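-- pv_equiv track=rewrite | github.com/zchfvy/snakebird | game.py | update_end
-- ===== SOURCE A (Python) =====
-- import copy
--
-- def update_end(board, endpoint):
--     board = copy.deepcopy(board)
--     if not endpoint:
--         return board
--     elem = board[endpoint[0]][endpoint[1]]
--     elem_cls = elem.split()[0]
--     removed = []
--     if elem_cls == 'snake':
--         is_head = elem.split()[2] == '0'
--         if is_head and not any_fruit_exists(board):
--             elem_id = ' '.join(elem.split()[0:2])
--             removed.append(elem_id)
--
--     for rem in removed:
--         for y, row in enumerate(board):
--             for x, elem in enumerate(row):
--                 if elem.startswith(rem):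
--                     board[y][x] = 'space'
--
--     return board
--
-- def any_fruit_exists(board):
--     for row in board:
--         for elem in row:
--             if elem == 'fruit':
--                 return True
--     return False
-- ===== SOURCE B (Python) =====
-- def update_end(board, endpoint):
--     if not endpoint:
--         return [row[:] for row in board]
--     parts = board[endpoint[0]][endpoint[1]].split()
--     head = parts[0] == 'snake' and parts[2] == '0'
--     clear_id = ' '.join(parts[:2])
--     # one fused pass: detect fruit while speculatively clearing
--     cleared = []
--     fruit = False
--     for row in board:
--         new_row = []
--         for e in row:
--             fruit = fruit or e == 'fruit'
--             new_row.append('space' if head and e.startswith(clear_id) else e)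
--         cleared.append(new_row)
--     if head and not fruit:
--         return cleared
--     return [row[:] for row in board]
-- ===== Notes on version B (the rewrite author's own statement) =====
-- stated objective: alternative
-- what changed: Replaces A's staged passes (deepcopy, separate fruit scan, then a removed-ids list driving a second clearing scan) with one fused traversal that simultaneously detects fruit and builds a speculatively-cleared board, selecting between the cleared board and a fresh copy at the end.
import Mathlib
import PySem

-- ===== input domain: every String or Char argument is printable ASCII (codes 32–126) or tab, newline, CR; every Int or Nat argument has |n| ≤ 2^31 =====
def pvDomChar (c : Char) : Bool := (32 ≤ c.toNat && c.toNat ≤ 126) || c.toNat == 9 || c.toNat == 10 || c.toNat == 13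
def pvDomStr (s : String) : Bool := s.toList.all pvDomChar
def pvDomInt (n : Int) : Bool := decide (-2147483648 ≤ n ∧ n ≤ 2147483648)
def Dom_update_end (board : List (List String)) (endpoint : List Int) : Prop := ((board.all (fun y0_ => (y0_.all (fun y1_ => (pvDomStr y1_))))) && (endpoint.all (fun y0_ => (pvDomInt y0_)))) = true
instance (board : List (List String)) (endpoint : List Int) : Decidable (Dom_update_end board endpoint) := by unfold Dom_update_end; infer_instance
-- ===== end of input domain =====

-- B replaces A's staged passes (fruit scan, then a removed-ids clearing scan over a deep
-- copy) with one fused traversal that detects fruit while speculatively clearing, then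
-- selects the result (objective: alternative). Return-value equivalence only
-- (A returns a fresh deep copy; B builds fresh rows likewise).

-- board[endpoint[0]][endpoint[1]]: shared index chain (none = IndexError, excluded by Pre_)
def endCell (board : List (List String)) (endpoint : List Int) : Option String :=
  (PySem.List.pyGet? endpoint 0).bind (fun i =>
  (PySem.List.pyGet? endpoint 1).bind (fun j =>
  (PySem.List.pyGet? board i).bind (fun row =>
  PySem.List.pyGet? row j)))

-- ===== PORT A =====
def any_fruit_exists (board : List (List String)) : Bool :=
  board.any (fun row => row.any (fun elem => elem == "fruit"))

def update_end (board : List (List String)) (endpoint : List Int) : List (List String) :=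
  -- copy.deepcopy(board): value-identical; return value is what is claimed
  if endpoint = [] then board
  else
    match endCell board endpoint with
    | none => board   -- Python raises IndexError here; outside Pre_
    | some elem =>
      let elemCls := (PySem.Str.split₀ elem).getD 0 ""   -- elem.split()[0]; empty split raises, outside Pre_
      let removed : List String :=
        if elemCls = "snake" then
          let isHead := (PySem.Str.split₀ elem).getD 2 "" = "0"   -- elem.split()[2]; short split raises, outside Pre_
          if isHead ∧ ¬ (any_fruit_exists board = true) then
            [PySem.Str.join " " ((PySem.Str.split₀ elem).take 2)]
          else []
        else []
      removed.foldl (fun b rem =>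
        b.map (fun row => row.map (fun e =>
          if PySem.Str.startswith e rem then "space" else e))) board

-- ===== PORT B =====
def update_end_alt (board : List (List String)) (endpoint : List Int) : List (List String) :=
  if endpoint = [] then board.map (fun row => row.map (fun e => e))
  else
    match endCell board endpoint with
    | none => board   -- Python raises IndexError here; outside Pre_
    | some elem =>
      let parts := PySem.Str.split₀ elem
      let head := parts.getD 0 "" == "snake" && parts.getD 2 "" == "0"  -- short-circuit 'and', short split raises only when snake: outside Pre_
      let cid := PySem.Str.join " " (parts.take 2)
      -- fused pass: (cleared-so-far, fruit-seen-so-far)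
      let res := board.foldl (fun (st : List (List String) × Bool) row =>
        let inner := row.foldl (fun (st2 : List String × Bool) e =>
          (st2.1 ++ [if head && PySem.Str.startswith e cid then "space" else e],
           st2.2 || (e == "fruit"))) (([] : List String), st.2)
        (st.1 ++ [inner.1], inner.2)) (([] : List (List String)), false)
      if head && !res.2 then res.1
      else board.map (fun row => row.map (fun e => e))

-- ===== PRECONDITION & SPEC =====
-- Pre_ excludes exactly the IndexError inputs: an endpoint list of length 1, an out-of-range
-- board index, a whitespace-only endpoint cell (split()[0]), or a 'snake' cell with fewer
-- than 3 tokens (split()[2]).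
def Pre_update_end (board : List (List String)) (endpoint : List Int) : Prop :=
  (decide (endpoint = []) ||
   (match endCell board endpoint with
    | none => false
    | some elem =>
      let parts := PySem.Str.split₀ elem
      !parts.isEmpty && (!(parts.getD 0 "" == "snake") || decide (3 ≤ parts.length)))) = true
instance (board : List (List String)) (endpoint : List Int) : Decidable (Pre_update_end board endpoint) := by unfold Pre_update_end; infer_instance

def pvWitness_update_end : List (List String) × List Int := ([["snake 1 0", "space"], ["snake 1 1", "wall"]], [0, 0])

def Spec_update_end (board : List (List String)) (endpoint : List Int) (out : List (List String)) : Prop := out = update_end_alt board endpoint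
instance (board : List (List String)) (endpoint : List Int) (out : List (List String)) : Decidable (Spec_update_end board endpoint out) := by unfold Spec_update_end; infer_instance

-- ===== CLAIM =====
def Claim_equal_update_end : Prop := ∀ (board : List (List String)) (endpoint : List Int), Dom_update_end board endpoint → Pre_update_end board endpoint → Spec_update_end board endpoint (update_end board endpoint)

-- ===== LEMMAS AND PROOFS =====

-- characterise B's inner fold: appends the cleared row, ORs in fruit detection
theorem inner_fold (head : Bool) (cid : String) (row : List String)
    (acc : List String) (f : Bool) :
    row.foldl (fun (st2 : List String × Bool) e =>
        (st2.1 ++ [if head && PySem.Str.startswith e cid then "space" else e],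
         st2.2 || (e == "fruit"))) (acc, f)
    = (acc ++ row.map (fun e => if head && PySem.Str.startswith e cid then "space" else e),
       f || row.any (fun e => e == "fruit")) := by
  induction row generalizing acc f with
  | nil => simp
  | cons x xs ih => rw [List.foldl_cons, ih]; simp [Bool.or_assoc]

-- characterise B's outer fold
theorem outer_fold (head : Bool) (cid : String) (board : List (List String))
    (acc : List (List String)) (f : Bool) :
    board.foldl (fun (st : List (List String) × Bool) row =>
        let inner := row.foldl (fun (st2 : List String × Bool) e =>
          (st2.1 ++ [if head && PySem.Str.startswith e cid then "space" else e],
           st2.2 || (e == "fruit"))) (([] : List String), st.2)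
        (st.1 ++ [inner.1], inner.2)) (acc, f)
    = (acc ++ board.map (fun row => row.map (fun e =>
          if head && PySem.Str.startswith e cid then "space" else e)),
       f || any_fruit_exists board) := by
  induction board generalizing acc f with
  | nil => simp [any_fruit_exists]
  | cons r rs ih =>
      rw [List.foldl_cons, ih]
      dsimp only
      rw [inner_fold]
      simp [any_fruit_exists, Bool.or_assoc]

-- ===== VERDICT =====
theorem update_end_spec : Claim_equal_update_end := by
  unfold Claim_equal_update_end
  intro board endpoint _ hpre
  unfold Spec_update_end update_end update_end_alt
  by_cases hep : endpoint = []
  · simp [hep]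
  · simp only [if_neg hep]
    cases hcell : endCell board endpoint with
    | none =>
        exfalso
        unfold Pre_update_end at hpre
        simp [hcell, hep] at hpre
    | some elem =>
        dsimp only
        rw [outer_fold]
        by_cases hs : (PySem.Str.split₀ elem)[0]?.getD "" = "snake"
        · by_cases hh : (PySem.Str.split₀ elem)[2]?.getD "" = "0"
          · by_cases hf : any_fruit_exists board = true
            · simp [hs, hh, hf]
            · simp only [Bool.not_eq_true] at hf
              simp [hs, hh, hf]
          · simp [hs, hh]
        · simp [hs]
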